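-- pv_equiv track=rewrite | github.com/Xero-Hige/Abacakus | Librerias/Conversor.py | negar_binario
-- ===== SOURCE A (Python) =====
-- def negar_binario(numero_binario):
-- 	resultado = ""
-- 	for x in numero_binario:
-- 		if (x == "1"):
-- 			resultado += "0"
-- 		elif (x == "0"):
-- 			resultado += "1"
-- 		else:
-- 			raise ValueError
--
-- 	return resultado
-- ===== SOURCE B (Python) =====
-- def negar_binario(numero_binario):
--     if set(numero_binario) - {'0', '1'}:
--         raise ValueError
--     return numero_binario.translate(str.maketrans('01', '10'))
-- ===== Notes on version B (the rewrite author's own statement) =====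
-- stated objective: idiomatic
-- what changed: Replaces the per-character branch-and-concatenate loop by an up-front set-based validation pass followed by one bulk str.translate.
-- outside the precondition, e.g. on negar_binario('10a'): A raises ValueError, B raises ValueError
import Mathlib
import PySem

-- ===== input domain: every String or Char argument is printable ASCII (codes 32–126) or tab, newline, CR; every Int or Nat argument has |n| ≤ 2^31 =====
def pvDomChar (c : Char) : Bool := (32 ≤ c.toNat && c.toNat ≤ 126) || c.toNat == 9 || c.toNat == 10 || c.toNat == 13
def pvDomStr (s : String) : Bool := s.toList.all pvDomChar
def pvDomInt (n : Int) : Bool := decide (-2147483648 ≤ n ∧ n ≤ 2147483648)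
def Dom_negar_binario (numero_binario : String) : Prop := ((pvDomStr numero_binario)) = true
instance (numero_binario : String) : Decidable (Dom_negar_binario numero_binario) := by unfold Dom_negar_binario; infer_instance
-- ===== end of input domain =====

-- B replaces A's per-character branch-and-append loop by a validate-then-translate pass;
-- equivalence of return values is proved on Pre_ (strings of '0'/'1' only, where A does not raise).
-- ===== PORT A =====
-- loop of A: accumulator `resultado`, one branch per character; the `raise` branch stops
-- (unreached under Pre_negar_binario)
def negAGo (acc : List Char) : List Char → List Char
  | [] => acc
  | x :: xs =>
    if x = '1' then negAGo (acc ++ ['0']) xs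
    else if x = '0' then negAGo (acc ++ ['1']) xs
    else acc

def negar_binario (numero_binario : String) : String :=
  String.mk (negAGo [] numero_binario.toList)

-- ===== PORT B =====
-- the translate table of Source B: '0' ↔ '1', everything else unchanged
def trB (c : Char) : Char := if c = '0' then '1' else if c = '1' then '0' else c

def negar_binario_alt (numero_binario : String) : String :=
  -- set(numero_binario) - {'0','1'} nonempty → raise (unreached under Pre_negar_binario)
  if ((PySem.Set.ofList numero_binario.toList).filter (fun c => c ≠ '0' ∧ c ≠ '1')) ≠ [] then ""
  else String.mk (numero_binario.toList.map trB)

-- ===== PRECONDITION & SPEC =====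
-- Pre_ excludes exactly the inputs with a character other than '0'/'1', on which A raises ValueError.
def Pre_negar_binario (numero_binario : String) : Prop :=
  (numero_binario.toList.all (fun c => c == '0' || c == '1')) = true
instance (numero_binario : String) : Decidable (Pre_negar_binario numero_binario) := by
  unfold Pre_negar_binario; infer_instance
def pvWitness_negar_binario : String := "0110"

def Spec_negar_binario (numero_binario : String) (out : String) : Prop := out = negar_binario_alt numero_binario
instance (numero_binario : String) (out : String) : Decidable (Spec_negar_binario numero_binario out) := by unfold Spec_negar_binario; infer_instance

-- ===== CLAIM (what is proved, stated in full; the proofs are below) =====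
def Claim_equal_negar_binario : Prop := ∀ (numero_binario : String), Dom_negar_binario numero_binario → Pre_negar_binario numero_binario → Spec_negar_binario numero_binario (negar_binario numero_binario)

-- ===== LEMMAS AND PROOFS =====
theorem negAGo_eq_map (l : List Char) (h : ∀ c ∈ l, c = '0' ∨ c = '1') (acc : List Char) :
    negAGo acc l = acc ++ l.map trB := by
  induction l generalizing acc with
  | nil => simp [negAGo]
  | cons x xs ih =>
    rcases h x (by simp) with hx | hx <;>
      simp [negAGo, hx, trB, ih (fun c hc => h c (by simp [hc]))]

theorem pre_forall (s : String) (h : Pre_negar_binario s) :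
    ∀ c ∈ s.toList, c = '0' ∨ c = '1' := by
  intro c hc
  have := List.all_eq_true.mp h c hc
  simp at this
  tauto

theorem filter_nil_of_pre (s : String) (h : Pre_negar_binario s) :
    ((PySem.Set.ofList s.toList).filter (fun c => c ≠ '0' ∧ c ≠ '1')) = [] := by
  rw [List.filter_eq_nil_iff]
  intro c hc
  have : c ∈ s.toList := (PySem.Set.mem_ofList _ _).mp hc
  rcases pre_forall s h c this with h0 | h0 <;> simp [h0]

-- ===== VERDICT (by name: the statement is the Claim_ definition above) =====
theorem negar_binario_spec : Claim_equal_negar_binario := by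
  intro s _ hp
  show negar_binario s = negar_binario_alt s
  unfold negar_binario negar_binario_alt
  rw [filter_nil_of_pre s hp]
  simp [negAGo_eq_map s.toList (pre_forall s hp)]
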